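-- pv_equiv track=rewrite | github.com/phuongphh/TaxAssistant | .github/scripts/code_review.py | filter_diff
-- ===== SOURCE A (Python) =====
-- def filter_diff(raw_diff: str) -> str:
--     """Remove diff hunks for files under .github/ and docs/."""
--     filtered_lines: list[str] = []
--     skip = False
--     for line in raw_diff.split("\n"):
--         if line.startswith("diff --git"):
--             # e.g. "diff --git a/.github/scripts/code_review.py b/..."
--             path = line.split(" b/")[-1] if " b/" in line else ""
--             skip = path.startswith(".github/") or path.startswith("docs/")
--         if not skip:
--             filtered_lines.append(line)
--     return "\n".join(filtered_lines)
-- ===== SOURCE B (Python) =====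
-- def filter_diff(raw_diff: str) -> str:
--     """Remove diff hunks for files under .github/ and docs/.
--
--     Splits the diff into explicit hunk groups (a preamble group plus one
--     group per 'diff --git' header), decides keep/drop once per group, then
--     rejoins the kept groups' lines.
--     """
--     groups: list[list[str]] = []
--     current: list[str] = []
--     for line in raw_diff.split("\n"):
--         if line.startswith("diff --git"):
--             groups.append(current)
--             current = [line]
--         else:
--             current.append(line)
--     groups.append(current)
--
--     def keep(group: list[str]) -> bool:
--         if not group or not group[0].startswith("diff --git"):
--             return True
--         header = group[0]
--         path = header.split(" b/")[-1] if " b/" in header else ""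
--         return not (path.startswith(".github/") or path.startswith("docs/"))
--
--     return "\n".join(line for g in groups if keep(g) for line in g)
-- ===== Notes on version B (the rewrite author's own statement) =====
-- stated objective: alternative
-- what changed: Replaces the per-line skip flag with an explicit decomposition: the diff is split into hunk groups (preamble + one group per 'diff --git' header), each group is kept or dropped once by its header's path, and the kept groups are rejoined.
import Mathlib
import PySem

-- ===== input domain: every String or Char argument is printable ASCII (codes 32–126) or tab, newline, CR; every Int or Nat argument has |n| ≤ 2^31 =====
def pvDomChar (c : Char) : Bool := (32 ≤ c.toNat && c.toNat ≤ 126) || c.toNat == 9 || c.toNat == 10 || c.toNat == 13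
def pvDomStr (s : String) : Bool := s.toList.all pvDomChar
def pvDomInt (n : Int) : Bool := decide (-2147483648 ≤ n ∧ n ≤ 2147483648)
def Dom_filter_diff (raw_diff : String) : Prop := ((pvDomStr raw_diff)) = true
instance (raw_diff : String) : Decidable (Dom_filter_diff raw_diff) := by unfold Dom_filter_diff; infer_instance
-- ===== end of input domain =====

-- B re-decomposes A's per-line skip-flag pass into explicit hunk groups filtered once per group;
-- equivalence of the two passes is proved for every input (both are total).

-- ===== PORT A =====
-- line.startswith("diff --git")  (the same expression occurs verbatim in both Pythons)
def pvIsHeader (line : String) : Bool := PySem.Str.startswith line "diff --git"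

-- path = line.split(" b/")[-1] if " b/" in line else ""; path.startswith(".github/") or path.startswith("docs/")
def pvDropHeader (line : String) : Bool :=
  let path := if PySem.Str.isIn " b/" line
    then PySem.List.pyGetD ((PySem.Str.split? line " b/").getD []) (-1) ""
    else ""
  PySem.Str.startswith path ".github/" || PySem.Str.startswith path "docs/"

-- loop body of A: state = (filtered_lines, skip)
def pvStepA (st : List String × Bool) (line : String) : List String × Bool :=
  let skip := if pvIsHeader line then pvDropHeader line else st.2
  (if skip then st.1 else st.1 ++ [line], skip)

def filter_diff (raw_diff : String) : String :=
  let st := ((PySem.Str.split? raw_diff "\n").getD []).foldl pvStepA ([], false)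
  PySem.Str.join "\n" st.1

-- ===== PORT B =====
-- loop body of B: state = (groups, current)
def pvStepB (st : List (List String) × List String) (line : String) :
    List (List String) × List String :=
  if pvIsHeader line then (st.1 ++ [st.2], [line]) else (st.1, st.2 ++ [line])

-- keep(group) of B
def pvKeep : List String → Bool
  | [] => true
  | h :: _ => if pvIsHeader h then !pvDropHeader h else true

def filter_diff_alt (raw_diff : String) : String :=
  let st := ((PySem.Str.split? raw_diff "\n").getD []).foldl pvStepB ([], [])
  let groups := st.1 ++ [st.2]
  PySem.Str.join "\n" ((groups.filter pvKeep).flatten)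

-- ===== PRECONDITION & SPEC =====
def Spec_filter_diff (raw_diff : String) (out : String) : Prop := out = filter_diff_alt raw_diff
instance (raw_diff : String) (out : String) : Decidable (Spec_filter_diff raw_diff out) := by unfold Spec_filter_diff; infer_instance

-- ===== CLAIM (what is proved, stated in full; the proofs are below) =====
def Claim_equal_filter_diff : Prop := ∀ (raw_diff : String), Dom_filter_diff raw_diff → Spec_filter_diff raw_diff (filter_diff raw_diff)

-- ===== LEMMAS AND PROOFS =====

-- recursive reading of A's loop: the lines it appends from `ls` given current skip flag `s`
def pvALoop : List String → Bool → List String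
  | [], _ => []
  | l :: ls, s =>
    let s' := if pvIsHeader l then pvDropHeader l else s
    (if s' then [] else [l]) ++ pvALoop ls s'

lemma pvFoldA (ls : List String) : ∀ (acc : List String) (s : Bool),
    (ls.foldl pvStepA (acc, s)).1 = acc ++ pvALoop ls s := by
  induction ls with
  | nil => intro acc s; simp [pvALoop]
  | cons l ls ih =>
    intro acc s
    simp only [List.foldl_cons, pvStepA, pvALoop]
    by_cases h : pvIsHeader l <;> simp only [h, if_true, if_false, Bool.false_eq_true] <;>
      split_ifs <;> simp_all

lemma pvKeep_append (cur : List String) (l : String) (h : pvIsHeader l = false) :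
    pvKeep (cur ++ [l]) = pvKeep cur := by
  cases cur with
  | nil => simp [pvKeep, h]
  | cons c cs => simp [pvKeep]

lemma pvFoldB (ls : List String) : ∀ (gs : List (List String)) (cur : List String),
    ((((ls.foldl pvStepB (gs, cur)).1 ++ [(ls.foldl pvStepB (gs, cur)).2]).filter pvKeep).flatten)
      = ((gs.filter pvKeep).flatten) ++ (if pvKeep cur then cur else []) ++ pvALoop ls (!pvKeep cur) := by
  induction ls with
  | nil =>
    intro gs cur
    simp only [List.foldl_nil, List.filter_append, List.flatten_append, pvALoop, List.append_nil]
    by_cases h : pvKeep cur <;> simp [List.filter, h]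
  | cons l ls ih =>
    intro gs cur
    by_cases h : pvIsHeader l
    · have step : pvStepB (gs, cur) l = (gs ++ [cur], [l]) := by simp [pvStepB, h]
      simp only [List.foldl_cons, step, ih]
      have hk : pvKeep [l] = !pvDropHeader l := by simp [pvKeep, h]
      simp only [pvALoop, h, if_true, List.filter_append, List.flatten_append, hk,
        Bool.not_not]
      by_cases hc : pvKeep cur <;> by_cases hd : pvDropHeader l <;>
        simp [List.filter, hc, hd]
    · have step : pvStepB (gs, cur) l = (gs, cur ++ [l]) := by simp [pvStepB, h]
      simp only [List.foldl_cons, step, ih, pvKeep_append cur l (by simpa using h)]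
      simp only [pvALoop, h, if_false, Bool.false_eq_true]
      by_cases hc : pvKeep cur <;> simp [hc]

-- ===== VERDICT (by name: the statement is the Claim_ definition above) =====
theorem filter_diff_spec : Claim_equal_filter_diff := by
  intro raw_diff _
  show filter_diff raw_diff = filter_diff_alt raw_diff
  unfold filter_diff filter_diff_alt
  dsimp only
  rw [pvFoldA, pvFoldB]
  simp [pvKeep]
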